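-- pv_equiv track=rewrite | github.com/fhabert/test_fol | tableau.py | parse_implication
-- ===== SOURCE A (Python) =====
-- def parse_implication(fmla):
--     beta = ""
--     if fmla[0] != "-":
--         counter = 0
--         for i in range (len(fmla)):
--             if ord(fmla[i]) > 97 and ord(fmla[i]) < 122 and counter == 0:
--                 counter += 1
--                 if fmla[i-1] != "-":
--                     beta += "-"
--             if fmla[i] == ">":
--                 beta += "v"
--             else:
--                 beta += fmla[i]
--     else:
--         counter = 0
--         for i in range(1, len(fmla)):
--             if ord(fmla[i]) > 97 and ord(fmla[i]) < 122 and counter == 0: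
--                 counter = 1
--             elif ord(fmla[i]) > 97 and ord(fmla[i]) < 122 and counter == 1:
--                 if fmla[i-1] != "-":
--                     beta += "-"
--                 counter += 1
--             if fmla[i] == ">":
--                 beta += "^"
--             else:
--                 beta += fmla[i]
--     return beta
-- ===== SOURCE B (Python) =====
-- def parse_implication(fmla):
--     if fmla[0] != "-":
--         s = fmla.replace(">", "v")
--         for i, c in enumerate(fmla):
--             if 97 < ord(c) < 122:
--                 if fmla[i - 1] != "-":
--                     return s[:i] + "-" + s[i:]
--                 return s
--         return s
--     else:
--         rest = fmla[1:]
--         t = rest.replace(">", "^")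
--         idxs = [j for j, c in enumerate(rest) if 97 < ord(c) < 122]
--         if len(idxs) >= 2:
--             k = idxs[1]
--             if rest[k - 1] != "-":
--                 return t[:k] + "-" + t[k:]
--         return t
-- ===== Notes on version B (the rewrite author's own statement) =====
-- stated objective: faster
-- what changed: A builds the output character by character in two index loops carrying a counter state; B replaces the arrow wholesale with str.replace, locates the first (resp. second) variable index, and splices the negation sign in by slicing, returning early.
import Mathlib
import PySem

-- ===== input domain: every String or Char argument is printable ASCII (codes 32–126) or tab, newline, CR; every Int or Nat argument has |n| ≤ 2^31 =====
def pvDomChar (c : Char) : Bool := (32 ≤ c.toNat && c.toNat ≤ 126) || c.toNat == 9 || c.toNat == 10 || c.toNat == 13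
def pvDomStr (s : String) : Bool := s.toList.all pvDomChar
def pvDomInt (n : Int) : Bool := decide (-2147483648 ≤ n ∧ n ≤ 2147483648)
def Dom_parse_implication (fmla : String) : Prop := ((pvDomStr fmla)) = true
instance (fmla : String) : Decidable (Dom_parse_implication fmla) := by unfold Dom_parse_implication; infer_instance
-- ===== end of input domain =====

-- B replaces A's two counter-carrying index loops by slice-and-splice: replace the arrow
-- wholesale, locate the first (resp. second) variable index, and splice the negation sign
-- in by take/drop (measured faster: bulk string ops and early return instead of a per-char
-- Python loop; same behaviour, including fmla[i-1] at i = 0 reading the last char).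

-- ===== PORT A =====
-- one loop step of A's first branch (fmla[0] != "-"): state = (beta, counter)
def pvStepA1 (cs : List Char) (st : List Char × Int) (i : Nat) : List Char × Int :=
  let c := cs.getD i ' '   -- i < cs.length always (Python fmla[i])
  let st' :=
    if 97 < c.toNat ∧ c.toNat < 122 ∧ st.2 = 0 then
      -- fmla[i-1]: at i = 0 Python reads fmla[-1] (negative-index wrap); always in range here
      (st.1 ++ (if (PySem.List.pyGet? cs ((i : Int) - 1)).getD ' ' ≠ '-' then ['-'] else []), st.2 + 1)
    else st
  (st'.1 ++ [if c = '>' then 'v' else c], st'.2)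

-- one loop step of A's second branch (fmla[0] == "-"): i ranges over [1, len), i-1 ≥ 0
def pvStepA2 (cs : List Char) (st : List Char × Int) (i : Nat) : List Char × Int :=
  let c := cs.getD i ' '
  let st' :=
    if 97 < c.toNat ∧ c.toNat < 122 ∧ st.2 = 0 then (st.1, (1 : Int))
    else if 97 < c.toNat ∧ c.toNat < 122 ∧ st.2 = 1 then
      (st.1 ++ (if cs.getD (i - 1) ' ' ≠ '-' then ['-'] else []), st.2 + 1)
    else st
  (st'.1 ++ [if c = '>' then '^' else c], st'.2)

def parse_implication (fmla : String) : String :=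
  let cs := fmla.toList
  if PySem.Str.pyGet? fmla 0 ≠ some '-' then
    String.ofList ((List.range cs.length).foldl (pvStepA1 cs) ([], 0)).1
  else
    String.ofList ((List.range' 1 (cs.length - 1)).foldl (pvStepA2 cs) ([], 0)).1

-- ===== PORT B =====
def pvQual (c : Char) : Bool := decide (97 < c.toNat) && decide (c.toNat < 122)

def pvRV (c : Char) : Char := if c = '>' then 'v' else c   -- fmla.replace('>', 'v'), per char

def pvR2 (c : Char) : Char := if c = '>' then '^' else c   -- rest.replace('>', '^'), per char

def parse_implication_alt (fmla : String) : String :=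
  let cs := fmla.toList
  if PySem.Str.pyGet? fmla 0 ≠ some '-' then
    let s := cs.map pvRV
    match cs.findIdx? pvQual with
    | none => String.ofList s
    | some i =>
      if (PySem.List.pyGet? cs ((i : Int) - 1)).getD ' ' ≠ '-' then
        String.ofList (s.take i ++ '-' :: s.drop i)
      else String.ofList s
  else
    let rest := cs.tail
    let t := rest.map pvR2
    -- [j for j, c in enumerate(rest) if 97 < ord(c) < 122], second element if any
    match (rest.zipIdx.filter (fun p => pvQual p.1)).map (·.2) with
    | _ :: k :: _ =>
      if rest.getD (k - 1) ' ' ≠ '-' then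
        String.ofList (t.take k ++ '-' :: t.drop k)
      else String.ofList t
    | _ => String.ofList t

-- ===== PRECONDITION & SPEC =====
-- Pre_: Python A raises IndexError on the empty string (fmla[0]); excluded.
def Pre_parse_implication (fmla : String) : Prop := fmla ≠ ""
instance (fmla : String) : Decidable (Pre_parse_implication fmla) := by unfold Pre_parse_implication; infer_instance
def pvWitness_parse_implication : String := "p>q"

def Spec_parse_implication (fmla : String) (out : String) : Prop := out = parse_implication_alt fmla
instance (fmla : String) (out : String) : Decidable (Spec_parse_implication fmla out) := by unfold Spec_parse_implication; infer_instance

-- ===== CLAIM (what is proved, stated in full; the proofs are below) =====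
def Claim_equal_parse_implication : Prop := ∀ (fmla : String), Dom_parse_implication fmla → Pre_parse_implication fmla → Spec_parse_implication fmla (parse_implication fmla)

-- ===== LEMMAS AND PROOFS =====

-- closed form of A's first loop after m steps: '>'→'v' on the first m chars, with '-'
-- spliced at the first pvQual index (guarded by the wrap-around predecessor test)
def pvIns (cs : List Char) (k : Nat) (l : List Char) : List Char :=
  l.take k ++ (if (PySem.List.pyGet? cs ((k : Int) - 1)).getD ' ' ≠ '-' then ['-'] else []) ++ l.drop k

def pvOut1 (cs : List Char) (m : Nat) : List Char × Int :=
  match (cs.take m).findIdx? pvQual with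
  | none => ((cs.take m).map pvRV, 0)
  | some k => (pvIns cs k ((cs.take m).map pvRV), 1)

-- closed form of A's second loop after j steps over rest = cs.tail: counter = min 2
-- (number of pvQual indices seen), '-' spliced at the second such index
def pvIdxs (rest : List Char) (j : Nat) : List Nat :=
  (((rest.take j).zipIdx).filter (fun p => pvQual p.1)).map (·.2)

def pvIns2 (rest : List Char) (k : Nat) (l : List Char) : List Char :=
  l.take k ++ (if rest.getD (k - 1) ' ' ≠ '-' then ['-'] else []) ++ l.drop k

def pvOut2 (rest : List Char) (j : Nat) : List Char × Int :=
  match pvIdxs rest j with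
  | [] => ((rest.take j).map pvR2, 0)
  | [_] => ((rest.take j).map pvR2, 1)
  | _ :: k :: _ => (pvIns2 rest k ((rest.take j).map pvR2), 2)

theorem pvLem1 (cs : List Char) (m : Nat) (hm : m ≤ cs.length) :
    (List.range m).foldl (pvStepA1 cs) ([], 0) = pvOut1 cs m := by
  induction m with
  | zero => simp [pvOut1]
  | succ m ih =>
    have hm' : m ≤ cs.length := Nat.le_of_succ_le hm
    have hlt : m < cs.length := hm
    rw [List.range_succ, List.foldl_append, ih hm', List.foldl_cons, List.foldl_nil]
    have htake : cs.take (m+1) = cs.take m ++ [cs[m]] := List.take_succ_eq_append_getElem hlt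
    have hgetD : cs.getD m ' ' = cs[m] := by simp [List.getD, List.getElem?_eq_getElem hlt]
    have hlen : ((cs.take m).map pvRV).length = m := by
      simp only [List.length_map, List.length_take]; omega
    cases hfi : (cs.take m).findIdx? pvQual with
    | none =>
      by_cases hq : pvQual cs[m] = true
      · have hq' : 97 < cs[m].toNat ∧ cs[m].toNat < 122 := by simpa [pvQual] using hq
        have hfi2 : (cs.take m ++ [cs[m]]).findIdx? pvQual = some m := by
          rw [List.findIdx?_append, hfi]
          simp only [Option.none_or, List.findIdx?_cons, hq, List.length_take]
          simp [Nat.min_eq_left hm']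
        simp only [pvOut1, hfi, htake, hfi2, pvIns, List.map_append]
        rw [List.take_left' hlen, List.drop_left' hlen]
        simp only [pvStepA1, hgetD]
        rw [if_pos ⟨hq'.1, hq'.2, trivial⟩]
        simp [pvRV, List.append_assoc]
      · have hq' : ¬(97 < cs[m].toNat ∧ cs[m].toNat < 122) := by simp [pvQual] at hq; omega
        have hfi2 : (cs.take m ++ [cs[m]]).findIdx? pvQual = none := by
          rw [List.findIdx?_append, hfi]
          simp [List.findIdx?_cons, hq]
        simp only [pvOut1, hfi, htake, hfi2, List.map_append]
        simp only [pvStepA1, hgetD]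
        rw [if_neg (by tauto)]
        simp [pvRV]
    | some k =>
      have hk : k < m := by
        have h1 := (List.findIdx?_eq_some_iff_findIdx_eq.mp hfi).1
        simp only [List.length_take] at h1; omega
      have hfi2 : (cs.take m ++ [cs[m]]).findIdx? pvQual = some k := by
        rw [List.findIdx?_append, hfi]; rfl
      simp only [pvOut1, hfi, htake, hfi2, pvIns, List.map_append]
      have hk' : k ≤ ((cs.take m).map pvRV).length := by omega
      rw [List.take_append_of_le_length hk', List.drop_append_of_le_length hk']
      simp only [pvStepA1, hgetD]
      rw [if_neg (by simp)]
      simp [pvRV, List.append_assoc]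

theorem pvIdxs_lt (rest : List Char) (j : Nat) : ∀ x ∈ pvIdxs rest j, x < j := by
  intro x hx
  simp only [pvIdxs, List.mem_map, List.mem_filter] at hx
  obtain ⟨⟨a, i⟩, ⟨hmem, -⟩, rfl⟩ := hx
  have := List.mem_zipIdx hmem
  simp only [List.length_take] at this
  omega

theorem pvLem2 (c0 : Char) (rest : List Char) (j : Nat) (hj : j ≤ rest.length) :
    (List.range' 1 j).foldl (pvStepA2 (c0 :: rest)) ([], 0) = pvOut2 rest j := by
  induction j with
  | zero => simp [pvOut2, pvIdxs]
  | succ j ih =>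
    have hj' : j ≤ rest.length := Nat.le_of_succ_le hj
    have hlt : j < rest.length := hj
    rw [List.range'_1_concat, List.foldl_append, ih hj', List.foldl_cons, List.foldl_nil]
    have htake : rest.take (j+1) = rest.take j ++ [rest[j]] := List.take_succ_eq_append_getElem hlt
    have hgetD : (c0 :: rest).getD (1 + j) ' ' = rest[j] := by
      rw [Nat.add_comm]
      simp [List.getD, List.getElem?_eq_getElem hlt]
    have hlen : ((rest.take j).map pvR2).length = j := by
      simp only [List.length_map, List.length_take]; omega
    have hidx : pvIdxs rest (j+1)
        = pvIdxs rest j ++ (if pvQual rest[j] then [j] else []) := by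
      simp only [pvIdxs, htake, List.zipIdx_append, List.zipIdx_singleton, List.filter_append,
        List.map_append, List.length_take, Nat.zero_add, Nat.min_eq_left hj']
      by_cases hq : pvQual rest[j] = true <;> simp [hq]
    cases hfi : pvIdxs rest j with
    | nil =>
      by_cases hq : pvQual rest[j] = true
      · have hq' : 97 < rest[j].toNat ∧ rest[j].toNat < 122 := by simpa [pvQual] using hq
        simp only [pvOut2, hfi, hidx, hq, if_pos, htake, List.map_append, List.nil_append]
        simp only [pvStepA2, hgetD]
        rw [if_pos ⟨hq'.1, hq'.2, trivial⟩]
        simp [pvR2]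
      · have hq' : ¬(97 < rest[j].toNat ∧ rest[j].toNat < 122) := by simp [pvQual] at hq; omega
        simp only [pvOut2, hfi, hidx, hq, htake, List.map_append]
        simp only [pvStepA2, hgetD]
        rw [if_neg (by tauto), if_neg (by tauto)]
        simp [pvR2]
    | cons k1 tl1 =>
      have hk1 : k1 < j := pvIdxs_lt rest j k1 (by rw [hfi]; exact List.mem_cons_self)
      cases tl1 with
      | nil =>
        by_cases hq : pvQual rest[j] = true
        · have hq' : 97 < rest[j].toNat ∧ rest[j].toNat < 122 := by simpa [pvQual] using hq
          simp only [pvOut2, hfi, hidx, hq, if_pos, htake, List.map_append, pvIns2,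
            List.cons_append, List.nil_append]
          rw [List.take_left' hlen, List.drop_left' hlen]
          simp only [pvStepA2, hgetD]
          rw [if_neg (by simp), if_pos ⟨hq'.1, hq'.2, trivial⟩]
          have hpred : (c0 :: rest).getD (1 + j - 1) ' ' = rest.getD (j - 1) ' ' := by
            have h1 : 1 + j - 1 = j := by omega
            rw [h1]
            cases j with
            | zero => omega
            | succ j' => simp
          rw [hpred]
          simp [pvR2, List.append_assoc]
        · have hq' : ¬(97 < rest[j].toNat ∧ rest[j].toNat < 122) := by simp [pvQual] at hq; omega
          simp only [pvOut2, hfi, hidx, hq, htake, List.map_append]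
          simp only [pvStepA2, hgetD]
          rw [if_neg (by tauto), if_neg (by tauto)]
          simp [pvR2]
      | cons k2 tl2 =>
        have hk2 : k2 < j := pvIdxs_lt rest j k2 (by rw [hfi]; simp)
        simp only [pvOut2, hfi, hidx, htake, List.map_append, pvIns2, List.cons_append]
        have hk2' : k2 ≤ ((rest.take j).map pvR2).length := by omega
        rw [List.take_append_of_le_length hk2', List.drop_append_of_le_length hk2']
        simp only [pvStepA2, hgetD]
        rw [if_neg (by simp), if_neg (by simp)]
        simp [pvR2, List.append_assoc]

-- ===== VERDICT (by name: the statement is the Claim_ definition above) =====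
theorem parse_implication_spec : Claim_equal_parse_implication := by
  intro fmla _hD _hP
  unfold Spec_parse_implication
  simp only [parse_implication, parse_implication_alt]
  by_cases hc : PySem.Str.pyGet? fmla 0 ≠ some '-'
  · rw [if_pos hc, if_pos hc]
    rw [pvLem1 fmla.toList fmla.toList.length (le_refl _)]
    simp only [pvOut1, List.take_length]
    cases hfi : fmla.toList.findIdx? pvQual with
    | none => rfl
    | some i =>
      simp only [pvIns]
      by_cases hpred : (PySem.List.pyGet? fmla.toList ((i : Int) - 1)).getD ' ' ≠ '-'
      · rw [if_pos hpred, if_pos hpred]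
        congr 1
        rw [List.append_assoc]
        rfl
      · rw [if_neg hpred, if_neg hpred]
        congr 1
        rw [List.append_nil, List.take_append_drop]
  · rw [if_neg hc, if_neg hc]
    cases hcs : fmla.toList with
    | nil =>
      exfalso
      apply hc
      simp [PySem.Str.pyGet?, PySem.List.pyGet?, hcs]
    | cons c0 rest =>
      have hlen1 : (c0 :: rest).length - 1 = rest.length := by simp
      rw [hlen1, List.tail_cons, pvLem2 c0 rest rest.length (le_refl _)]
      simp only [pvOut2, pvIdxs, List.take_length]
      cases hfi : (rest.zipIdx.filter (fun p => pvQual p.1)).map (·.2) with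
      | nil => rfl
      | cons k1 tl1 =>
        cases tl1 with
        | nil => rfl
        | cons k2 tl2 =>
          simp only [pvIns2]
          by_cases hpred : rest.getD (k2 - 1) ' ' ≠ '-'
          · rw [if_pos hpred, if_pos hpred]
            congr 1
            rw [List.append_assoc]
            rfl
          · rw [if_neg hpred, if_neg hpred]
            congr 1
            rw [List.append_nil, List.take_append_drop]
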